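-- pv_equiv track=rewrite | github.com/yaryaja/POS_Tagger | pos_tagger_lstm.py | calculate_index
-- ===== SOURCE A (Python) =====
-- def calculate_index(all_data):
--   word_to_idx = {}
--   tag_to_idx = {}
--   char_to_idx = {}
--   for sentence in all_data:
--       for word, pos_tag in sentence:
--           if word not in word_to_idx.keys():
--               word_to_idx[word] = len(word_to_idx)
--           if pos_tag not in tag_to_idx.keys():
--               tag_to_idx[pos_tag] = len(tag_to_idx)
--           for char in word:
--               if char not in char_to_idx.keys():
--                   char_to_idx[char] = len(char_to_idx)
--
--   return word_to_idx,tag_to_idx,char_to_idx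
-- ===== SOURCE B (Python) =====
-- def calculate_index(all_data):
--     words, tags, chars = [], [], []
--     for sentence in all_data:
--         for word, pos_tag in sentence:
--             words.append(word)
--             tags.append(pos_tag)
--             chars.extend(word)
--
--     def index(seq):
--         first = {}
--         for i, x in reversed(list(enumerate(seq))):
--             first[x] = i
--         return {x: j for j, x in enumerate(sorted(first, key=first.get))}
--
--     return index(words), index(tags), index(chars)
-- ===== Notes on version B (the rewrite author's own statement) =====
-- stated objective: alternative
-- what changed: Instead of A's online dict insertions guarded by membership tests, B collects the word/tag/char streams, computes each element's first-occurrence position by a reversed overwrite pass over enumerate, and obtains the index dict by sorting the keys by that position and numbering them.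
import Mathlib
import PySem

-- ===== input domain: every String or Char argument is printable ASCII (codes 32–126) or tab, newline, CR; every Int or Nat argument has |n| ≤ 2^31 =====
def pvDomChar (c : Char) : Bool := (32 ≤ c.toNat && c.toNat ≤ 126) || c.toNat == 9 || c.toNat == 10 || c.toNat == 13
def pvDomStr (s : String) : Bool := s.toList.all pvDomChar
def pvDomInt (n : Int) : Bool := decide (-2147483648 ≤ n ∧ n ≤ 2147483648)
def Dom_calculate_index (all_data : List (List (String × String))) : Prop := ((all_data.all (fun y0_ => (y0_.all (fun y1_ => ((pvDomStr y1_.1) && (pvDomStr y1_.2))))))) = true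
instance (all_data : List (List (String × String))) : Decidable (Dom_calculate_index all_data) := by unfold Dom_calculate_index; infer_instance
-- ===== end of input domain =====

-- B computes the index dicts by a different algorithm: it collects the word/tag/char streams,
-- records each element's FIRST-occurrence position by a reversed overwrite pass, then sorts the
-- keys by that position and numbers them (objective: alternative; not faster — it adds a sort).

-- ===== PORT A =====
-- one (word, pos_tag) step of A's inner loop over a sentence, threading the three dicts
def ciStep (st : PySem.Dict String Int × PySem.Dict String Int × PySem.Dict String Int)
    (p : String × String) : PySem.Dict String Int × PySem.Dict String Int × PySem.Dict String Int :=
  let w := if !(st.1.contains p.1) then st.1.insert p.1 (st.1.size : Int) else st.1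
  let t := if !(st.2.1.contains p.2) then st.2.1.insert p.2 (st.2.1.size : Int) else st.2.1
  -- 'for char in word': Python iterates the 1-character substrings, ported as String.ofList [c]
  let c := p.1.toList.foldl
    (fun d ch => if !(d.contains (String.ofList [ch])) then d.insert (String.ofList [ch]) (d.size : Int) else d)
    st.2.2
  (w, t, c)

def calculate_index (all_data : List (List (String × String))) :
    (List (String × Int)) × (List (String × Int)) × (List (String × Int)) :=
  let st := all_data.foldl (fun st sentence => sentence.foldl ciStep st)
    (PySem.Dict.empty, PySem.Dict.empty, PySem.Dict.empty)
  (st.1.items, st.2.1.items, st.2.2.items)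

-- ===== PORT B =====
-- first = {}; for i, x in reversed(list(enumerate(seq))): first[x] = i
def ciFirst (seq : List String) : PySem.Dict String Int :=
  (PySem.List.enumerate seq).reverse.foldl (fun d p => d.insert p.2 p.1) PySem.Dict.empty

-- {x: j for j, x in enumerate(sorted(first, key=first.get))}
def ciIndex (seq : List String) : List (String × Int) :=
  (PySem.List.enumerate
      (PySem.List.sorted (ciFirst seq).keys (fun k => (ciFirst seq).getD k 0) false)).map
    (fun p => (p.2, p.1))

def calculate_index_alt (all_data : List (List (String × String))) :
    (List (String × Int)) × (List (String × Int)) × (List (String × Int)) :=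
  -- collection pass: words.append(word); tags.append(pos_tag); chars.extend(word)
  let acc := all_data.foldl (fun acc sentence => sentence.foldl
      (fun acc p => (acc.1 ++ [p.1], acc.2.1 ++ [p.2],
                     acc.2.2 ++ p.1.toList.map (fun c => String.ofList [c]))) acc)
    (([] : List String), ([] : List String), ([] : List String))
  (ciIndex acc.1, ciIndex acc.2.1, ciIndex acc.2.2)

-- ===== PRECONDITION & SPEC =====
def Spec_calculate_index (all_data : List (List (String × String))) (out : (List (String × Int)) × (List (String × Int)) × (List (String × Int))) : Prop := out = calculate_index_alt all_data
instance (all_data : List (List (String × String))) (out : (List (String × Int)) × (List (String × Int)) × (List (String × Int))) : Decidable (Spec_calculate_index all_data out) := by unfold Spec_calculate_index; infer_instance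

-- ===== CLAIM (what is proved, stated in full; the proofs are below) =====
def Claim_equal_calculate_index : Prop := ∀ (all_data : List (List (String × String))), Dom_calculate_index all_data → Spec_calculate_index all_data (calculate_index all_data)

-- ===== LEMMAS AND PROOFS =====

-- the items list of an index dict over the distinct list u: [(u₀,0),(u₁,1),…]
def ciE (u : List String) : List (String × Int) :=
  (PySem.List.enumerate u).map (fun p => (p.2, p.1))

theorem keys_mk_ciE (u : List String) : (PySem.Dict.mk (ciE u)).keys = u := by
  simp [ciE, PySem.Dict.keys, List.map_map, Function.comp_def, PySem.List.map_snd_enumerate]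

theorem contains_mk_ciE (u : List String) (k : String) :
    (PySem.Dict.mk (ciE u)).contains k = u.contains k := by
  rw [PySem.Dict.contains_eq_decide_mem_keys, keys_mk_ciE]
  simp

theorem size_mk_ciE (u : List String) : (PySem.Dict.mk (ciE u)).size = u.length := by
  simp [ciE, PySem.Dict.size, PySem.List.length_enumerate]

theorem step_mk_ciE (u : List String) (k : String) :
    (if !((PySem.Dict.mk (ciE u)).contains k)
      then (PySem.Dict.mk (ciE u)).insert k ((PySem.Dict.mk (ciE u)).size : Int)
      else PySem.Dict.mk (ciE u)) = PySem.Dict.mk (ciE (PySem.Set.add u k)) := by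
  rw [contains_mk_ciE]
  by_cases h : k ∈ u
  · simp [PySem.Set.add, PySem.Set.contains, h]
  · have hc : u.contains k = false := by simpa using h
    have hadd : PySem.Set.add u k = u ++ [k] := by
      simp [PySem.Set.add, PySem.Set.contains, h]
    rw [hc, hadd]
    simp only [Bool.not_false, if_true]
    apply PySem.Dict.ext
    rw [PySem.Dict.items_insert_of_not_contains _ _ (by rw [contains_mk_ciE]; exact hc)]
    rw [size_mk_ciE]
    simp [ciE, PySem.List.enumerate_append, PySem.List.enumerate_cons, PySem.List.enumerate_nil]

theorem fold_step_mk_ciE {α : Type} (f : α → String) (l : List α) (u : List String) :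
    l.foldl (fun d a => if !(d.contains (f a)) then d.insert (f a) (d.size : Int) else d)
      (PySem.Dict.mk (ciE u)) = PySem.Dict.mk (ciE (PySem.Set.update u (l.map f))) := by
  induction l generalizing u with
  | nil => simp [PySem.Set.update]
  | cons a l ih =>
      simp only [List.foldl_cons, List.map_cons]
      rw [step_mk_ciE, ih]
      rfl

-- character stream contributed by one pair
def ciChars (p : String × String) : List String := p.1.toList.map (fun c => String.ofList [c])

theorem fold_ciStep (pairs : List (String × String)) (u v x : List String) :
    pairs.foldl ciStep (PySem.Dict.mk (ciE u), PySem.Dict.mk (ciE v), PySem.Dict.mk (ciE x)) =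
      (PySem.Dict.mk (ciE (PySem.Set.update u (pairs.map (fun p => p.1)))),
       PySem.Dict.mk (ciE (PySem.Set.update v (pairs.map (fun p => p.2)))),
       PySem.Dict.mk (ciE (PySem.Set.update x (pairs.flatMap ciChars)))) := by
  induction pairs generalizing u v x with
  | nil => simp [PySem.Set.update]
  | cons p l ih =>
      simp only [List.foldl_cons, List.map_cons, List.flatMap_cons]
      have hstep : ciStep (PySem.Dict.mk (ciE u), PySem.Dict.mk (ciE v), PySem.Dict.mk (ciE x)) p =
          (PySem.Dict.mk (ciE (PySem.Set.add u p.1)), PySem.Dict.mk (ciE (PySem.Set.add v p.2)),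
           PySem.Dict.mk (ciE (PySem.Set.update x (ciChars p)))) := by
        simp only [ciStep]
        refine congrArg₂ Prod.mk (step_mk_ciE u p.1) (congrArg₂ Prod.mk (step_mk_ciE v p.2) ?_)
        exact fold_step_mk_ciE (fun c => String.ofList [c]) p.1.toList x
      rw [hstep, ih]
      refine congrArg₂ Prod.mk rfl (congrArg₂ Prod.mk rfl ?_)
      congr 1
      simp [PySem.Set.update, List.foldl_append]

theorem foldl_foldl_flatMap {α β : Type} (f : β → α → β) (L : List (List α)) (init : β) :
    L.foldl (fun st s => s.foldl f st) init = (L.flatMap (fun s => s)).foldl f init := by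
  induction L generalizing init with
  | nil => rfl
  | cons s L ih => simp [List.foldl_append, ih]

-- B-side: the reversed-enumerate build, generalized over the enumerate start
def ciBuild (l : List String) (s : Int) : PySem.Dict String Int :=
  (PySem.List.enumerate l s).reverse.foldl (fun d p => d.insert p.2 p.1) PySem.Dict.empty

theorem ciFirst_eq_ciBuild (seq : List String) : ciFirst seq = ciBuild seq 0 := rfl

theorem ciBuild_cons (y : String) (l : List String) (s : Int) :
    ciBuild (y :: l) s = (ciBuild l (s + 1)).insert y s := by
  simp [ciBuild, PySem.List.enumerate_cons, List.foldl_append]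

theorem getD_ciBuild (l : List String) (s : Int) (x : String) (hx : x ∈ l) :
    (ciBuild l s).getD x 0 = s + (l.idxOf x : Int) := by
  induction l generalizing s with
  | nil => cases hx
  | cons y l ih =>
      rw [ciBuild_cons]
      by_cases hxy : x = y
      · subst hxy
        rw [PySem.Dict.getD_insert_self]
        simp [List.idxOf_cons_self]
      · rw [PySem.Dict.getD_insert, if_neg hxy]
        have hxl : x ∈ l := by
          rcases List.mem_cons.mp hx with h | h
          · exact absurd h hxy
          · exact h
        rw [ih (s + 1) hxl, List.idxOf_cons_ne l (fun h => hxy h.symm)]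
        push_cast
        ring

theorem keys_ciBuild (l : List String) (s : Int) :
    (ciBuild l s).keys = PySem.Set.ofList l.reverse := by
  have h := PySem.Dict.keys_foldl_insert_key (PySem.List.enumerate l s).reverse
    (fun p => p.2) (fun _ p => p.1) PySem.Dict.empty
  simp only [ciBuild]
  rw [h]
  simp [PySem.Dict.keys_empty, PySem.Set.update_nil_left, List.map_reverse,
    PySem.List.map_snd_enumerate]

theorem mem_keys_ciBuild (l : List String) (s : Int) (x : String) :
    x ∈ (ciBuild l s).keys ↔ x ∈ l := by
  rw [keys_ciBuild, PySem.Set.mem_ofList, List.mem_reverse]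

-- first-occurrence positions strictly increase along the dedup order
theorem pairwise_idxOf_ofList (l : List String) :
    (PySem.Set.ofList l).Pairwise (fun a b => l.idxOf a < l.idxOf b) := by
  induction l with
  | nil => simp [PySem.Set.ofList]
  | cons y l ih =>
      rw [PySem.Set.ofList_cons]
      refine List.pairwise_cons.mpr ⟨?_, ?_⟩
      · intro b hb
        obtain ⟨hbl, hby⟩ := (PySem.Set.mem_discard _ _ _).mp hb
        have hbl' : b ∈ l := (PySem.Set.mem_ofList _ _).mp hbl
        rw [List.idxOf_cons_self, List.idxOf_cons_ne l (fun h => hby h.symm)]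
        omega
      · have hd : PySem.Set.discard (PySem.Set.ofList l) y
            = (PySem.Set.ofList l).filter (fun z => z != y) := rfl
        rw [hd]
        refine (ih.filter _).imp_of_mem ?_
        intro a b ha hb hab
        have ha' := List.mem_filter.mp ha
        have hb' := List.mem_filter.mp hb
        have hay : a ≠ y := by simpa using ha'.2
        have hby : b ≠ y := by simpa using hb'.2
        rw [List.idxOf_cons_ne l (fun h => hay h.symm),
            List.idxOf_cons_ne l (fun h => hby h.symm)]
        omega

theorem sorted_keys_ciFirst (seq : List String) :
    PySem.List.sorted (ciFirst seq).keys (fun k => (ciFirst seq).getD k 0) false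
      = PySem.Set.ofList seq := by
  apply PySem.List.sorted_eq_of_perm_of_pairwise_lt
  · refine (List.perm_ext_iff_of_nodup (PySem.Set.nodup_ofList _) ?_).mpr ?_
    · rw [ciFirst_eq_ciBuild, keys_ciBuild]
      exact PySem.Set.nodup_ofList _
    · intro a
      rw [ciFirst_eq_ciBuild, mem_keys_ciBuild, PySem.Set.mem_ofList]
  · refine (pairwise_idxOf_ofList seq).imp_of_mem ?_
    intro a b ha hb hab
    have ha' : a ∈ seq := (PySem.Set.mem_ofList _ _).mp ha
    have hb' : b ∈ seq := (PySem.Set.mem_ofList _ _).mp hb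
    rw [ciFirst_eq_ciBuild, getD_ciBuild seq 0 a ha', getD_ciBuild seq 0 b hb']
    omega

theorem ciIndex_eq (seq : List String) : ciIndex seq = ciE (PySem.Set.ofList seq) := by
  rw [ciIndex, sorted_keys_ciFirst]
  rfl

-- B's collection pass over the flattened pair stream
theorem collect_pairs (pairs : List (String × String)) (ws ts cs : List String) :
    pairs.foldl (fun acc p => (acc.1 ++ [p.1], acc.2.1 ++ [p.2],
        acc.2.2 ++ p.1.toList.map (fun c => String.ofList [c]))) (ws, ts, cs)
      = (ws ++ pairs.map (fun p => p.1), ts ++ pairs.map (fun p => p.2),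
         cs ++ pairs.flatMap ciChars) := by
  induction pairs generalizing ws ts cs with
  | nil => simp
  | cons p l ih => simp [ih, ciChars]

-- ===== VERDICT (by name: the statement is the Claim_ definition above) =====
theorem calculate_index_spec : Claim_equal_calculate_index := by
  intro all_data _
  show calculate_index all_data = calculate_index_alt all_data
  have hempty : (PySem.Dict.empty : PySem.Dict String Int) = PySem.Dict.mk (ciE []) := rfl
  have hofList : ∀ l : List String, PySem.Set.update ([] : List String) l = PySem.Set.ofList l := by
    intro l; rfl
  simp only [calculate_index, calculate_index_alt, foldl_foldl_flatMap, hempty, fold_ciStep,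
    collect_pairs, List.nil_append, ciIndex_eq, hofList]
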